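-- pv_equiv track=rewrite | github.com/qmfszxn0cmk/ansi-fontpress | abcs.py | create_canvas
-- ===== SOURCE A (Python) =====
-- def create_canvas(fill='$', width=4, weight=2, letter_height=9, drip_height=2):
--     canvas = []
--     f = fill * weight
--     counter = ' ' * width
--     frame = f + counter + f
--     drip = '.' * len(frame)
--
--     for i in range(letter_height):
--
--         if i == 0: # top cap
--             canvas.append(frame.replace(' ', '"'))
--             continue
--         if i == letter_height - 1: # bottom cap (above drips)
--             canvas.append(frame.replace(' ', ','))
--             continue
--         canvas.append(frame)
--
--     for i in range(drip_height):
--         canvas.append(drip)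
--
--     return canvas
-- ===== SOURCE B (Python) =====
-- def create_canvas(fill='$', width=4, weight=2, letter_height=9, drip_height=2):
--     f = fill * weight
--     frame = f + ' ' * width + f
--     n = max(letter_height, 0)
--     rows = ([frame.replace(' ', '"')]
--             + [frame] * (n - 2)
--             + [frame.replace(' ', ',')])
--     return rows[:n] + ['.' * len(frame)] * max(drip_height, 0)
-- ===== Notes on version B (the rewrite author's own statement) =====
-- stated objective: alternative
-- what changed: Replaces A's per-row loop with in-loop top/bottom-cap branching by a branch-free, loop-free construction: concatenate the three segments [top cap] + middle rows + [bottom cap] and truncate to letter_height rows (so the 0- and 1-row cases, including top-cap-wins, fall out of the truncation), then append the drip rows as one replicated list.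
import Mathlib
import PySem

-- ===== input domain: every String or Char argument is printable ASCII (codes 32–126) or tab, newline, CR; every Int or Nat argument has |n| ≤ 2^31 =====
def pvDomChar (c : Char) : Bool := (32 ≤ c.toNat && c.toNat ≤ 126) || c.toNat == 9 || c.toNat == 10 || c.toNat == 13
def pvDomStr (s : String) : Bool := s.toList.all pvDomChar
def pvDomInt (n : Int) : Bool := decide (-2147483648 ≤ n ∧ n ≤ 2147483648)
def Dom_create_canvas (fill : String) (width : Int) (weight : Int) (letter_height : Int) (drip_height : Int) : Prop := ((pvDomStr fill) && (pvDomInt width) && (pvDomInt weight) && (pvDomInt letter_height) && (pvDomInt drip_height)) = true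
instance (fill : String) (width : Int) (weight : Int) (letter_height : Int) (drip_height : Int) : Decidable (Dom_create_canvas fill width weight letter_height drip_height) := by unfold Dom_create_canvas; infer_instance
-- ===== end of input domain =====

-- B replaces A's per-row loop with in-loop cap branching by a loop-free construction:
-- concatenate [top cap] + middle rows + [bottom cap] and truncate to letter_height rows
-- (the 0- and 1-row cases fall out of the truncation), then append the drips; objective: alternative.

-- ===== PORT A =====
def create_canvas (fill : String) (width : Int) (weight : Int) (letter_height : Int) (drip_height : Int) : List String :=
  let f := String.mk (PySem.List.pyRepeat fill.toList weight)
  let counter := String.mk (PySem.List.pyRepeat [' '] width)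
  let frame := f ++ counter ++ f
  let drip := String.mk (PySem.List.pyRepeat ['.'] (PySem.Str.len frame))
  let canvas : List String :=
    (PySem.List.pyRange 0 letter_height 1).foldl (fun acc i =>
      if i = 0 then acc ++ [PySem.Str.replace frame " " "\""]
      else if i = letter_height - 1 then acc ++ [PySem.Str.replace frame " " ","]
      else acc ++ [frame]) []
  (PySem.List.pyRange 0 drip_height 1).foldl (fun acc _ => acc ++ [drip]) canvas

-- ===== PORT B =====
def create_canvas_alt (fill : String) (width : Int) (weight : Int) (letter_height : Int) (drip_height : Int) : List String :=
  let f := String.mk (PySem.List.pyRepeat fill.toList weight)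
  let frame := f ++ String.mk (PySem.List.pyRepeat [' '] width) ++ f
  let n := max letter_height 0
  let rows : List String :=
    [PySem.Str.replace frame " " "\""]
      ++ PySem.List.pyRepeat [frame] (n - 2)
      ++ [PySem.Str.replace frame " " ","]
  PySem.List.slice rows none (some n)
    ++ PySem.List.pyRepeat [String.mk (PySem.List.pyRepeat ['.'] (PySem.Str.len frame))] (max drip_height 0)

-- ===== PRECONDITION & SPEC =====
def Spec_create_canvas (fill : String) (width : Int) (weight : Int) (letter_height : Int) (drip_height : Int) (out : List String) : Prop := out = create_canvas_alt fill width weight letter_height drip_height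
instance (fill : String) (width : Int) (weight : Int) (letter_height : Int) (drip_height : Int) (out : List String) : Decidable (Spec_create_canvas fill width weight letter_height drip_height out) := by unfold Spec_create_canvas; infer_instance

-- ===== CLAIM =====
def Claim_equal_create_canvas : Prop := ∀ (fill : String) (width : Int) (weight : Int) (letter_height : Int) (drip_height : Int), Dom_create_canvas fill width weight letter_height drip_height → Spec_create_canvas fill width weight letter_height drip_height (create_canvas fill width weight letter_height drip_height)

-- ===== LEMMAS AND PROOFS =====

-- an append-accumulating foldl is init ++ map
theorem pv_foldl_append {α β : Type} (g : α → β) (l : List α) (init : List β) :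
    l.foldl (fun acc x => acc ++ [g x]) init = init ++ l.map g := by
  induction l generalizing init with
  | nil => simp
  | cons x xs ih => simp [List.foldl_cons, ih, List.append_assoc]

-- closed form of A's letter loop vs B's concatenate-then-truncate, over Nat length
theorem pv_body_eq (top bot frame : String) (m : Nat) :
    (List.range m).map (fun k => if k = 0 then top else if k = m - 1 then bot else frame)
      = ([top] ++ List.replicate (m - 2) frame ++ [bot]).take m := by
  match m with
  | 0 => simp
  | 1 => simp [List.range_succ]
  | (k+2) =>
    rw [List.take_of_length_le (by simp)]
    rw [List.range_succ, List.map_append]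
    have hinit : (List.range (k+1)).map (fun j => if j = 0 then top else if j = k + 2 - 1 then bot else frame)
        = top :: List.replicate k frame := by
      rw [List.range_succ_eq_map, List.map_cons, List.map_map]
      have hmid : (List.range k).map ((fun j => if j = 0 then top else if j = k + 2 - 1 then bot else frame) ∘ Nat.succ)
          = (List.range k).map (fun _ => frame) := by
        apply List.map_congr_left
        intro j hj
        have hjk : j < k := List.mem_range.mp hj
        simp only [Function.comp]
        rw [if_neg (Nat.succ_ne_zero j), if_neg (by omega)]
      rw [hmid]
      simp [List.map_const']
    rw [hinit]
    simp

-- ===== VERDICT =====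
theorem create_canvas_spec : Claim_equal_create_canvas := by
  intro fill width weight letter_height drip_height _
  unfold Spec_create_canvas create_canvas create_canvas_alt
  simp only []
  set frame := String.mk (PySem.List.pyRepeat fill.toList weight) ++ String.mk (PySem.List.pyRepeat [' '] width) ++ String.mk (PySem.List.pyRepeat fill.toList weight) with hframe
  set top := PySem.Str.replace frame " " "\""
  set bot := PySem.Str.replace frame " " ","
  set drip := String.mk (PySem.List.pyRepeat ['.'] (PySem.Str.len frame))
  have hbody : (fun (acc : List String) (i : Int) =>
      if i = 0 then acc ++ [top] else if i = letter_height - 1 then acc ++ [bot] else acc ++ [frame])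
      = (fun acc i => acc ++ [if i = 0 then top else if i = letter_height - 1 then bot else frame]) := by
    funext acc i; split_ifs <;> rfl
  rw [hbody, pv_foldl_append (fun _ => drip), pv_foldl_append
      (fun i => if i = 0 then top else if i = letter_height - 1 then bot else frame)]
  have hmapconst : ∀ (l : List Int), l.map (fun _ => drip) = List.replicate l.length drip := by
    intro l; simp [List.map_const']
  rw [hmapconst, PySem.List.length_pyRange_one]
  rw [PySem.List.pyRepeat_singleton drip, PySem.List.pyRepeat_singleton frame]
  have hdn : (drip_height - 0).toNat = (max drip_height 0).toNat := by omega
  rw [hdn]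
  congr 1
  -- letter body
  rw [PySem.List.pyRange_one, Int.sub_zero]
  set m : Nat := letter_height.toNat with hm
  have hslice : PySem.List.slice ([top] ++ List.replicate ((max letter_height 0 - 2).toNat) frame ++ [bot])
      none (some (max letter_height 0))
      = ([top] ++ List.replicate (m - 2) frame ++ [bot]).take m := by
    rw [PySem.List.slice_to _ (by omega)]
    have h1 : (max letter_height 0 - 2).toNat = m - 2 := by omega
    have h2 : (max letter_height 0).toNat = m := by omega
    rw [h1, h2]
  rw [hslice, List.map_map]
  have hfun : ((fun i => if i = 0 then top else if i = letter_height - 1 then bot else frame) ∘ fun k : Nat => (0 : Int) + k)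
      = fun k : Nat => if k = 0 then top else if k = m - 1 then bot else frame := by
    funext k
    simp only [Function.comp, Int.zero_add]
    by_cases hk0 : k = 0
    · simp [hk0]
    · have : (k : Int) ≠ 0 := by exact_mod_cast hk0
      rw [if_neg this, if_neg hk0]
      by_cases hkl : (k : Int) = letter_height - 1
      · have hkn : k = m - 1 := by omega
        rw [if_pos hkl, if_pos hkn]
      · have hkn : k ≠ m - 1 := by
          intro h; apply hkl
          rcases Nat.eq_zero_or_pos m with h0 | hp
          · omega
          · have : letter_height = (m : Int) := by omega
            omega
        rw [if_neg hkl, if_neg hkn]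
  rw [hfun, pv_body_eq top bot frame m, List.nil_append]
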